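-- pv_equiv track=rewrite | github.com/Crengineer/Python-Projects | MasterThesis/Support_functions.py | cut_extension
-- ===== SOURCE A (Python) =====
-- def cut_extension(string):
--     value = '.'
--     ind = 0
--     for i in range(len(string)):
--         if string[i] == value:
--             ind = i
--     sub = string[:ind]
--
--     return sub
-- ===== SOURCE B (Python) =====
-- def cut_extension(string):
--     for i in range(len(string) - 1, -1, -1):
--         if string[i] == '.':
--             return string[:i]
--     return ''
-- ===== Notes on version B (the rewrite author's own statement) =====
-- stated objective: alternative
-- what changed: Replaced A's full forward pass that tracks the last dot index with a backward scan that returns the prefix before the first dot found from the end (early exit), keeping the empty-result behaviour when no dot exists.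
import Mathlib
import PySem

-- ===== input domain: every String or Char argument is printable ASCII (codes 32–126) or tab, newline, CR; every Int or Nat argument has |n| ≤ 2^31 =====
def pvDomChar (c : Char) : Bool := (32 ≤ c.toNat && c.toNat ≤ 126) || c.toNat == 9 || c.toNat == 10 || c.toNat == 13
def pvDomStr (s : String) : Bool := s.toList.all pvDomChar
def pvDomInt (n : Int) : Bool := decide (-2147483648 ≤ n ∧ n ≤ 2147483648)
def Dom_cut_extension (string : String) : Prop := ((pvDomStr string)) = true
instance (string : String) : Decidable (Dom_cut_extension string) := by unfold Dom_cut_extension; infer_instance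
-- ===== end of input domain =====

-- B replaces A's full forward pass tracking the last '.' index by a backward scan that
-- returns string[:i] at the first '.' seen from the end; return value is identical (alternative decomposition).

-- ===== PORT A =====
-- forward loop: for i in range(len(string)): if string[i] == '.': ind = i ; return string[:ind]
def cut_extension (string : String) : String :=
  let l := string.toList
  let ind : Int := (PySem.List.pyRange 0 (l.length : Int) 1).foldl
    (fun ind i => if PySem.List.pyGet? l i = some '.' then i else ind) 0
  String.ofList (PySem.List.slice l none (some ind))

-- ===== PORT B =====
-- backward scan: for i in range(len(string)-1, -1, -1): if string[i] == '.': return string[:i] ; return ''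
-- bScan l (i+1) inspects index i, then recurses down; bScan l 0 is the fall-through return ''.
def bScan (l : List Char) : Nat → String
  | 0 => ""
  | i + 1 =>
    if PySem.List.pyGet? l (i : Int) = some '.' then
      String.ofList (PySem.List.slice l none (some (i : Int)))
    else
      bScan l i

def cut_extension_alt (string : String) : String :=
  bScan string.toList string.toList.length

-- ===== PRECONDITION & SPEC =====
def Spec_cut_extension (string : String) (out : String) : Prop := out = cut_extension_alt string
instance (string : String) (out : String) : Decidable (Spec_cut_extension string out) := by unfold Spec_cut_extension; infer_instance

-- ===== CLAIM (what is proved, stated in full; the proofs are below) =====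
def Claim_equal_cut_extension : Prop := ∀ (string : String), Dom_cut_extension string → Spec_cut_extension string (cut_extension string)

-- ===== LEMMAS AND PROOFS =====

def aFold (l : List Char) : Int :=
  (PySem.List.pyRange 0 (l.length : Int) 1).foldl
    (fun ind i => if PySem.List.pyGet? l i = some '.' then i else ind) 0

theorem foldl_bounds_gen (l : List Char) (n : Int) (r : List Int) (init : Int)
    (hr : ∀ i ∈ r, 0 ≤ i ∧ i ≤ n) (h0 : 0 ≤ init) (h1 : init ≤ n) :
    0 ≤ r.foldl (fun ind i => if PySem.List.pyGet? l i = some '.' then i else ind) init ∧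
    r.foldl (fun ind i => if PySem.List.pyGet? l i = some '.' then i else ind) init ≤ n := by
  induction r generalizing init with
  | nil => exact ⟨h0, h1⟩
  | cons a r ih =>
    simp only [List.foldl_cons]
    have ha := hr a (List.mem_cons_self)
    refine ih _ (fun i hi => hr i (List.mem_cons_of_mem _ hi)) ?_ ?_ <;> split <;> omega

theorem aFold_bounds (l : List Char) : 0 ≤ aFold l ∧ aFold l ≤ (l.length : Int) := by
  unfold aFold
  refine foldl_bounds_gen l _ _ 0 ?_ le_rfl (by positivity)
  intro i hi
  have := (PySem.List.mem_pyRange_one).mp hi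
  omega

theorem aFold_append (l : List Char) (c : Char) :
    aFold (l ++ [c]) = if c = '.' then (l.length : Int) else aFold l := by
  unfold aFold
  have hlen : ((l ++ [c]).length : Int) = (l.length : Int) + 1 := by
    simp
  rw [hlen, PySem.List.pyRange_one_succ_right (by positivity), List.foldl_append]
  simp only [List.foldl_cons, List.foldl_nil]
  have hget : PySem.List.pyGet? (l ++ [c]) (l.length : Int) = some c := by
    simp [PySem.List.pyGet?_append_length (pre := l) (y := c) (ys := [])]
  have hcongr :
      (PySem.List.pyRange 0 (l.length : Int) 1).foldl
        (fun ind i => if PySem.List.pyGet? (l ++ [c]) i = some '.' then i else ind) 0 =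
      (PySem.List.pyRange 0 (l.length : Int) 1).foldl
        (fun ind i => if PySem.List.pyGet? l i = some '.' then i else ind) 0 := by
    apply PySem.List.foldl_congr_mem
    intro acc x hx
    have hx' := (PySem.List.mem_pyRange_one).mp hx
    have : PySem.List.pyGet? (l ++ [c]) x = PySem.List.pyGet? l x := by
      have hx0 : x = ((x.toNat : Nat) : Int) := by omega
      rw [hx0, PySem.List.pyGet?_natCast, PySem.List.pyGet?_natCast,
        List.getElem?_append_left (by omega)]
    rw [this]
  rw [hcongr, hget]
  by_cases hc : c = '.'
  · simp [hc]
  · simp [hc, Option.some.injEq]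

theorem bScan_append_le (l : List Char) (c : Char) (i : Nat) (h : i ≤ l.length) :
    bScan (l ++ [c]) i = bScan l i := by
  induction i with
  | zero => rfl
  | succ i ih =>
    have hget : PySem.List.pyGet? (l ++ [c]) (i : Int) = PySem.List.pyGet? l (i : Int) := by
      rw [PySem.List.pyGet?_natCast, PySem.List.pyGet?_natCast]
      rw [List.getElem?_append_left (by omega)]
    have hslice : PySem.List.slice (l ++ [c]) none (some (i : Int)) =
        PySem.List.slice l none (some (i : Int)) := by
      rw [PySem.List.slice_to_natCast, PySem.List.slice_to_natCast,
        List.take_append_of_le_length (by omega)]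
    simp only [bScan, hget, hslice, ih (by omega)]

theorem main_lemma (l : List Char) :
    String.ofList (PySem.List.slice l none (some (aFold l))) = bScan l l.length := by
  induction l using List.reverseRecOn with
  | nil => rfl
  | append_singleton l c ih =>
    have hlen : (l ++ [c]).length = l.length + 1 := by simp
    have hget : PySem.List.pyGet? (l ++ [c]) ((l.length : Nat) : Int) = some c := by
      simp [PySem.List.pyGet?_append_length (pre := l) (y := c) (ys := [])]
    rw [hlen, aFold_append]
    by_cases hc : c = '.'
    · subst hc
      rw [if_pos rfl]
      simp only [bScan]
      rw [if_pos hget]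
    · have hb := aFold_bounds l
      have hslice : PySem.List.slice (l ++ [c]) none (some (aFold l)) =
          PySem.List.slice l none (some (aFold l)) := by
        rw [PySem.List.slice_to _ hb.1, PySem.List.slice_to _ hb.1,
          List.take_append_of_le_length (by omega)]
      rw [if_neg hc]
      simp only [bScan, hget]
      rw [if_neg (show ¬ (some c = some '.') from fun h => hc (Option.some.inj h))]
      rw [hslice, bScan_append_le l c l.length le_rfl, ih]

-- ===== VERDICT (by name: the statement is the Claim_ definition above) =====
theorem cut_extension_spec : Claim_equal_cut_extension := by
  intro s _
  unfold Spec_cut_extension cut_extension cut_extension_alt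
  exact main_lemma s.toList
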